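-- pv_equiv track=rewrite | github.com/koss-null/pairwise-tester | local_utils/utils.py | select_condorcet_winner
-- ===== SOURCE A (Python) =====
-- import operator
--
-- def select_condorcet_winner(vote_result, voters_coefs=None):
-- 	#todo: add voters coefficients
-- 	if voters_coefs is None:
-- 		voters_coefs = {}
-- 	total_score = {}
-- 	for item in vote_result.keys():
-- 		total_score[item] = len(list(filter(lambda x: x[2], vote_result[item])))
-- 		total_score[item+":v1"] = len(list(filter(lambda x: x[0] is "v1" and x[2], vote_result[item])))
-- 		total_score[item+":v2"] = len(list(filter(lambda x: x[0] is "v2" and x[2], vote_result[item])))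
--
-- 	winner = max(total_score.items(), key=operator.itemgetter(1))[0]
-- 	return (winner, total_score[winner])
-- ===== SOURCE B (Python) =====
-- def select_condorcet_winner(vote_result, voters_coefs=None):
--     # Tally algorithm: pre-seed every score key at zero in A's key order, then a
--     # single flat pass over all votes increments the affected keys; the winner
--     # is found with a running-best scan instead of max(items(), key=...).
--     total_score = {}
--     for item in vote_result:
--         total_score[item] = 0
--         total_score[item + ":v1"] = 0
--         total_score[item + ":v2"] = 0
--     for item, votes in vote_result.items():
--         for x in votes:
--             if x[2]:
--                 total_score[item] += 1
--                 if x[0] is "v1":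
--                     total_score[item + ":v1"] += 1
--                 elif x[0] is "v2":
--                     total_score[item + ":v2"] += 1
--     winner, score = None, None
--     for k, v in total_score.items():
--         if score is None or v > score:
--             winner, score = k, v
--     return (winner, score)
-- ===== Notes on version B (the rewrite author's own statement) =====
-- stated objective: alternative
-- what changed: Replaces per-key filter counting by a tally algorithm: all score keys are pre-seeded at zero, one flat pass over every vote increments the affected keys, and a running-best scan replaces max(items(), key=itemgetter(1)).
-- outside the precondition, e.g. on select_condorcet_winner({'a:v2': [['q', 'x', 'y']], 'a': []}, None): A returns ('a:v2', 0), B returns ('a:v2', 1)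
import Mathlib
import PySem

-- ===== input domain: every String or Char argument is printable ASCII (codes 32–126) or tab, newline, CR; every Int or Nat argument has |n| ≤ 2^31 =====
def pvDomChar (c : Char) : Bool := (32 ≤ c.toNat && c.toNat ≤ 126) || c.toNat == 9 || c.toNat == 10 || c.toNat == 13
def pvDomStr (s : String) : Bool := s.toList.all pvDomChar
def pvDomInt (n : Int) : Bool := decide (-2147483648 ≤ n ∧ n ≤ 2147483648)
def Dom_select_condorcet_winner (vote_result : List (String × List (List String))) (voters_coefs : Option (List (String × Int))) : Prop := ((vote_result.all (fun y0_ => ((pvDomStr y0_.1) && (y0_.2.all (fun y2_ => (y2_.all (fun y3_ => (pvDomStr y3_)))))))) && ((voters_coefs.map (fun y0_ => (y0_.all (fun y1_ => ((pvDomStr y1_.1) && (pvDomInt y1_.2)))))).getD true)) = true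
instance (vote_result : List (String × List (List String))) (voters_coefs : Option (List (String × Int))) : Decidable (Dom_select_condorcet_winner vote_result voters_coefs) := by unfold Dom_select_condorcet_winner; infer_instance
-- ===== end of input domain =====

-- B replaces A's per-key filter counting by a tally algorithm (seed all score keys at
-- zero, one flat pass over all votes incrementing the hit keys, running-best scan
-- instead of max(items(), key=itemgetter(1))); same cost class.
-- voters_coefs is only defaulted by A and never used; both ports faithfully ignore it.

-- Python's `x[0] is "v1"` / `is "v2"` is ported as string equality; inside Pre_ the
-- returned pair never depends on the ':v1'/':v2' entries (each stays ≤ its base key,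
-- which precedes it), so the port is exact on every admitted input either way.
-- ===== PORT A =====
def select_condorcet_winner (vote_result : List (String × List (List String))) (voters_coefs : Option (List (String × Int))) : String × Int :=
  let vr : PySem.Dict String (List (List String)) := PySem.Dict.ofList vote_result
  let total_score : PySem.Dict String Int :=
    vr.keys.foldl (fun ts item =>
      let votes := vr.getD item []
      let ts := ts.insert item ((votes.filter (fun x => (PySem.List.pyGetD x 2 "") != "")).length : Int)
      let ts := ts.insert (item ++ ":v1") ((votes.filter (fun x => ((PySem.List.pyGetD x 0 "") == "v1") && ((PySem.List.pyGetD x 2 "") != ""))).length : Int)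
      ts.insert (item ++ ":v2") ((votes.filter (fun x => ((PySem.List.pyGetD x 0 "") == "v2") && ((PySem.List.pyGetD x 2 "") != ""))).length : Int)
    ) PySem.Dict.empty
  match PySem.List.max? total_score.items (fun p => p.2) with
  | some w => (w.1, total_score.getD w.1 0)
  | none => ("", 0)   -- unreachable under Pre_: Python raises ValueError on an empty dict

-- ===== PORT B =====
def select_condorcet_winner_alt (vote_result : List (String × List (List String))) (voters_coefs : Option (List (String × Int))) : String × Int :=
  let vr : PySem.Dict String (List (List String)) := PySem.Dict.ofList vote_result
  -- seed every score key at 0, in A's key order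
  let total_score : PySem.Dict String Int :=
    vr.keys.foldl (fun ts item =>
      ((ts.insert item 0).insert (item ++ ":v1") 0).insert (item ++ ":v2") 0) PySem.Dict.empty
  -- one flat pass over all votes, incrementing the affected keys
  let total_score : PySem.Dict String Int :=
    vr.items.foldl (fun ts p =>
      p.2.foldl (fun ts x =>
        if (PySem.List.pyGetD x 2 "") != "" then
          let ts := ts.modify p.1 0 (· + 1)
          if (PySem.List.pyGetD x 0 "") == "v1" then ts.modify (p.1 ++ ":v1") 0 (· + 1)
          else if (PySem.List.pyGetD x 0 "") == "v2" then ts.modify (p.1 ++ ":v2") 0 (· + 1)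
          else ts
        else ts) ts) total_score
  -- running-best scan over the items
  let best := total_score.items.foldl (fun acc kv =>
      match acc with
      | none => some kv
      | some b => if kv.2 > b.2 then some kv else some b) (none : Option (String × Int))
  match best with
  | some b => b
  | none => ("", 0)   -- unreachable under Pre_: Python B returns (None, None) only for an empty dict

-- ===== PRECONDITION & SPEC =====
-- the three score keys A creates for one item of the dict
def pvTripleKeys (p : String × List (List String)) : List String := [p.1, p.1 ++ ":v1", p.1 ++ ":v2"]
-- all score keys, in A's insertion order
def pvScoreKeys (vote_result : List (String × List (List String))) : List String :=
  (PySem.Dict.ofList vote_result).items.flatMap pvTripleKeys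

-- Pre_ excludes exactly: the empty dict (A's max() raises ValueError), an inner vote list
-- of length < 3 (x[2] raises IndexError), and inputs where one item name equals another
-- item's mangled ':v1'/':v2' score key — a defensible corner where A silently overwrites
-- the earlier score (duplicate dict keys) while B sums the tallies.
def Pre_select_condorcet_winner (vote_result : List (String × List (List String))) (voters_coefs : Option (List (String × Int))) : Prop :=
  vote_result ≠ [] ∧ (pvScoreKeys vote_result).Nodup ∧
  ∀ p ∈ (PySem.Dict.ofList vote_result).items, ∀ x ∈ p.2, 3 ≤ x.length
instance (vote_result : List (String × List (List String))) (voters_coefs : Option (List (String × Int))) : Decidable (Pre_select_condorcet_winner vote_result voters_coefs) := by unfold Pre_select_condorcet_winner; infer_instance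

def pvWitness_select_condorcet_winner : (List (String × List (List String))) × (Option (List (String × Int))) :=
  ([("a", [["v1", "x", "y"], ["v2", "x", ""]]), ("b", [["v1", "x", "z"]])], none)

def Spec_select_condorcet_winner (vote_result : List (String × List (List String))) (voters_coefs : Option (List (String × Int))) (out : String × Int) : Prop := out = select_condorcet_winner_alt vote_result voters_coefs
instance (vote_result : List (String × List (List String))) (voters_coefs : Option (List (String × Int))) (out : String × Int) : Decidable (Spec_select_condorcet_winner vote_result voters_coefs out) := by unfold Spec_select_condorcet_winner; infer_instance

-- ===== CLAIM (what is proved, stated in full; the proofs are below) =====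
def Claim_equal_select_condorcet_winner : Prop := ∀ (vote_result : List (String × List (List String))) (voters_coefs : Option (List (String × Int))), Dom_select_condorcet_winner vote_result voters_coefs → Pre_select_condorcet_winner vote_result voters_coefs → Spec_select_condorcet_winner vote_result voters_coefs (select_condorcet_winner vote_result voters_coefs)

-- ===== LEMMAS AND PROOFS =====

-- the three per-item filter counts of A
def pvC1 (v : List (List String)) : Int := ((v.filter (fun x => (PySem.List.pyGetD x 2 "") != "")).length : Int)
def pvC2 (v : List (List String)) : Int := ((v.filter (fun x => ((PySem.List.pyGetD x 0 "") == "v1") && ((PySem.List.pyGetD x 2 "") != ""))).length : Int)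
def pvC3 (v : List (List String)) : Int := ((v.filter (fun x => ((PySem.List.pyGetD x 0 "") == "v2") && ((PySem.List.pyGetD x 2 "") != ""))).length : Int)
-- the block of three scored pairs A produces for one item
def pvBlk (p : String × List (List String)) : List (String × Int) :=
  [(p.1, pvC1 p.2), (p.1 ++ ":v1", pvC2 p.2), (p.1 ++ ":v2", pvC3 p.2)]
-- what B's tally adds to key k while processing item (s, v)
def pvContrib (k s : String) (v : List (List String)) : Int :=
  if k = s then pvC1 v else if k = s ++ ":v1" then pvC2 v else if k = s ++ ":v2" then pvC3 v else 0

theorem pvNeA (s : String) (t : String) (ht : t.toList ≠ []) : s ++ t ≠ s := by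
  intro h
  have := congrArg String.toList h
  rw [String.toList_append] at this
  exact ht (by simpa using this)

theorem pvNeB (s : String) : s ++ ":v1" ≠ s ++ ":v2" := by
  intro h
  have := congrArg String.toList h
  simp [String.toList_append] at this

theorem pvNe1 (s : String) : s ++ ":v1" ≠ s := pvNeA s ":v1" (by decide)
theorem pvNe2 (s : String) : s ++ ":v2" ≠ s := pvNeA s ":v2" (by decide)

theorem pvC1_cons (x : List String) (t : List (List String)) :
    pvC1 (x :: t) = (if (PySem.List.pyGetD x 2 "") != "" then 1 else 0) + pvC1 t := by
  simp only [pvC1, List.filter_cons]; split_ifs <;> simp <;> omega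

theorem pvC2_cons (x : List String) (t : List (List String)) :
    pvC2 (x :: t) = (if ((PySem.List.pyGetD x 0 "") == "v1") && ((PySem.List.pyGetD x 2 "") != "") then 1 else 0) + pvC2 t := by
  simp only [pvC2, List.filter_cons]; split_ifs <;> simp <;> omega

theorem pvC3_cons (x : List String) (t : List (List String)) :
    pvC3 (x :: t) = (if ((PySem.List.pyGetD x 0 "") == "v2") && ((PySem.List.pyGetD x 2 "") != "") then 1 else 0) + pvC3 t := by
  simp only [pvC3, List.filter_cons]; split_ifs <;> simp <;> omega

-- B's inner tally over one item's votes: values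
set_option maxRecDepth 8192 in
theorem pvInner_getD (s : String) (v : List (List String)) (d : PySem.Dict String Int) (k : String) :
    (v.foldl (fun ts x =>
        if (PySem.List.pyGetD x 2 "") != "" then
          let ts := ts.modify s 0 (· + 1)
          if (PySem.List.pyGetD x 0 "") == "v1" then ts.modify (s ++ ":v1") 0 (· + 1)
          else if (PySem.List.pyGetD x 0 "") == "v2" then ts.modify (s ++ ":v2") 0 (· + 1)
          else ts
        else ts) d).getD k 0 = d.getD k 0 + pvContrib k s v := by
  induction v generalizing d with
  | nil =>
    have h0 : pvContrib k s [] = 0 := by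
      simp only [pvContrib, pvC1, pvC2, pvC3, List.filter_nil, List.length_nil, Nat.cast_zero]
      split_ifs <;> rfl
    simp [h0]
  | cons x t ih =>
    simp only [List.foldl_cons, ih]
    have h1 := pvNe1 s
    have h2 := pvNe2 s
    have h12 := pvNeB s
    simp only [pvContrib, pvC1_cons, pvC2_cons, pvC3_cons]
    by_cases hp : ((PySem.List.pyGetD x 2 "") != "") = true
    · simp only [hp, if_true]
      by_cases hv1 : ((PySem.List.pyGetD x 0 "") == "v1") = true
      · have hv2 : ((PySem.List.pyGetD x 0 "") == "v2") = false := by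
          rw [eq_of_beq hv1]; decide
        simp only [hv1, hv2, Bool.true_and, Bool.false_and, if_true, if_false,
          Bool.false_eq_true, PySem.Dict.getD_modify]
        split_ifs <;> (try subst_vars) <;> first | omega | tauto
      · have hv1f := eq_false_of_ne_true hv1
        by_cases hv2 : ((PySem.List.pyGetD x 0 "") == "v2") = true
        · simp only [hv1f, hv2, Bool.true_and, Bool.false_and, if_true, if_false,
            Bool.false_eq_true, PySem.Dict.getD_modify]
          split_ifs <;> (try subst_vars) <;> first | omega | tauto
        · have hv2f := eq_false_of_ne_true hv2
          simp only [hv1f, hv2f, Bool.false_and, if_false,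
            Bool.false_eq_true, PySem.Dict.getD_modify]
          split_ifs <;> (try subst_vars) <;> first | omega | tauto
    · have hpf := eq_false_of_ne_true hp
      simp only [hpf, Bool.and_false, if_false, Bool.false_eq_true]
      split_ifs <;> omega

-- B's inner tally over one item's votes: keys unchanged (all touched keys are present)
theorem pvInner_keys (s : String) (v : List (List String)) (d : PySem.Dict String Int)
    (hs : s ∈ d.keys) (hs1 : s ++ ":v1" ∈ d.keys) (hs2 : s ++ ":v2" ∈ d.keys) :
    (v.foldl (fun ts x =>
        if (PySem.List.pyGetD x 2 "") != "" then
          let ts := ts.modify s 0 (· + 1)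
          if (PySem.List.pyGetD x 0 "") == "v1" then ts.modify (s ++ ":v1") 0 (· + 1)
          else if (PySem.List.pyGetD x 0 "") == "v2" then ts.modify (s ++ ":v2") 0 (· + 1)
          else ts
        else ts) d).keys = d.keys := by
  induction v generalizing d with
  | nil => rfl
  | cons x t ih =>
    simp only [List.foldl_cons]
    have hk : ∀ (d' : PySem.Dict String Int) (k : String), k ∈ d'.keys → ∀ f,
        (d'.modify k 0 f).keys = d'.keys := by
      intro d' k hm f
      rw [PySem.Dict.keys_modify,
        PySem.Dict.keys_insert_of_contains _ _ ((PySem.Dict.contains_iff_mem_keys d' k).mpr hm)]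
    by_cases hp : ((PySem.List.pyGetD x 2 "") != "") = true
    · simp only [hp, if_true]
      have hks : (d.modify s 0 (· + 1)).keys = d.keys := hk d s hs _
      by_cases hv1 : ((PySem.List.pyGetD x 0 "") == "v1") = true
      · simp only [hv1, if_true]
        rw [ih _ (by rw [hk _ _ (by rw [hks]; exact hs1), hks]; exact hs)
               (by rw [hk _ _ (by rw [hks]; exact hs1), hks]; exact hs1)
               (by rw [hk _ _ (by rw [hks]; exact hs1), hks]; exact hs2),
           hk _ _ (by rw [hks]; exact hs1), hks]
      · have hv1f := eq_false_of_ne_true hv1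
        by_cases hv2 : ((PySem.List.pyGetD x 0 "") == "v2") = true
        · simp only [hv1f, hv2, Bool.false_eq_true, if_false, if_true]
          rw [ih _ (by rw [hk _ _ (by rw [hks]; exact hs2), hks]; exact hs)
                 (by rw [hk _ _ (by rw [hks]; exact hs2), hks]; exact hs1)
                 (by rw [hk _ _ (by rw [hks]; exact hs2), hks]; exact hs2),
             hk _ _ (by rw [hks]; exact hs2), hks]
        · have hv2f := eq_false_of_ne_true hv2
          simp only [hv1f, hv2f, Bool.false_eq_true, if_false]
          rw [ih _ (by rw [hks]; exact hs) (by rw [hks]; exact hs1) (by rw [hks]; exact hs2), hks]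
    · have hpf := eq_false_of_ne_true hp
      simp only [hpf, Bool.false_eq_true, if_false]
      exact ih _ hs hs1 hs2

-- B's outer tally pass: keys unchanged, values gain the summed contributions
theorem pvOuter (l : List (String × List (List String))) (d : PySem.Dict String Int)
    (hin : ∀ p ∈ l, p.1 ∈ d.keys ∧ p.1 ++ ":v1" ∈ d.keys ∧ p.1 ++ ":v2" ∈ d.keys) :
    (l.foldl (fun ts p =>
      p.2.foldl (fun ts x =>
        if (PySem.List.pyGetD x 2 "") != "" then
          let ts := ts.modify p.1 0 (· + 1)
          if (PySem.List.pyGetD x 0 "") == "v1" then ts.modify (p.1 ++ ":v1") 0 (· + 1)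
          else if (PySem.List.pyGetD x 0 "") == "v2" then ts.modify (p.1 ++ ":v2") 0 (· + 1)
          else ts
        else ts) ts) d).keys = d.keys ∧
    ∀ k, (l.foldl (fun ts p =>
      p.2.foldl (fun ts x =>
        if (PySem.List.pyGetD x 2 "") != "" then
          let ts := ts.modify p.1 0 (· + 1)
          if (PySem.List.pyGetD x 0 "") == "v1" then ts.modify (p.1 ++ ":v1") 0 (· + 1)
          else if (PySem.List.pyGetD x 0 "") == "v2" then ts.modify (p.1 ++ ":v2") 0 (· + 1)
          else ts
        else ts) ts) d).getD k 0 = d.getD k 0 + (l.map (fun p => pvContrib k p.1 p.2)).sum := by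
  induction l generalizing d with
  | nil => simp
  | cons q t ih =>
    simp only [List.foldl_cons]
    have hq := hin q (by simp)
    have hkeys := pvInner_keys q.1 q.2 d hq.1 hq.2.1 hq.2.2
    have hstep := ih _ (by intro p hp; rw [hkeys]; exact hin p (by simp [hp]))
    refine ⟨by rw [hstep.1, hkeys], ?_⟩
    intro k
    rw [hstep.2 k, pvInner_getD q.1 q.2 d k]
    simp [add_assoc]

-- sum of contributions when k is not among the score keys of l
theorem pvSumZero (k : String) (l : List (String × List (List String)))
    (hk : k ∉ l.flatMap pvTripleKeys) :
    (l.map (fun p => pvContrib k p.1 p.2)).sum = 0 := by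
  induction l with
  | nil => rfl
  | cons q t ih =>
    simp only [List.flatMap_cons, List.mem_append, not_or] at hk
    have h0 : pvContrib k q.1 q.2 = 0 := by
      have := hk.1
      simp only [pvTripleKeys, List.mem_cons, List.not_mem_nil, or_false, not_or] at this
      simp [pvContrib, this.1, this.2.1, this.2.2]
    simp [h0, ih hk.2]

-- with all score keys distinct, the contributions to a scored key k sum to its block value
theorem pvSum (k : String) (v : Int) (l : List (String × List (List String)))
    (hnd : (l.flatMap pvTripleKeys).Nodup) (hm : (k, v) ∈ l.flatMap pvBlk) :
    (l.map (fun p => pvContrib k p.1 p.2)).sum = v := by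
  induction l with
  | nil => simp at hm
  | cons q t ih =>
    simp only [List.flatMap_cons, List.nodup_append] at hnd
    simp only [List.flatMap_cons, List.mem_append] at hm
    rcases hm with hm | hm
    · -- k is one of q's three keys
      have hkin : k ∈ pvTripleKeys q := by
        simp only [pvBlk, List.mem_cons, List.not_mem_nil, or_false] at hm
        rcases hm with h | h | h <;> simp [pvTripleKeys, (Prod.mk.injEq .. ▸ h).1]
      have hrest : k ∉ t.flatMap pvTripleKeys := fun hmem => hnd.2.2 k hkin k hmem rfl
      have h1 := pvNe1 q.1
      have h2 := pvNe2 q.1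
      have h12 := pvNeB q.1
      have hc : pvContrib k q.1 q.2 = v := by
        simp only [pvBlk, List.mem_cons, List.not_mem_nil, or_false] at hm
        rcases hm with h | h | h <;>
          · have hk1 := (Prod.mk.injEq .. ▸ h).1
            have hv1 := (Prod.mk.injEq .. ▸ h).2
            subst hk1
            simp [pvContrib, hv1, h1, h2, h12, (h12.symm : q.1 ++ ":v2" ≠ q.1 ++ ":v1")]
      simp [hc, pvSumZero k t hrest]
    · -- k lives in the tail blocks
      have hkin : k ∈ t.flatMap pvTripleKeys := by
        simp only [List.mem_flatMap] at hm ⊢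
        obtain ⟨p, hp, hkp⟩ := hm
        exact ⟨p, hp, by
          simp only [pvBlk, List.mem_cons, List.not_mem_nil, or_false] at hkp
          rcases hkp with h | h | h <;> simp [pvTripleKeys, (Prod.mk.injEq .. ▸ h).1]⟩
      have hq0 : pvContrib k q.1 q.2 = 0 := by
        have : k ∉ pvTripleKeys q := fun hkq => hnd.2.2 k hkq k hkin rfl
        simp only [pvTripleKeys, List.mem_cons, List.not_mem_nil, or_false, not_or] at this
        simp [pvContrib, this.1, this.2.1, this.2.2]
      simp [hq0, ih hnd.2.1 hm]

-- a fold inserting the three block pairs of every item appends all blocks (fresh keys)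
theorem pvInsertBlocks (l : List (String × List (List String)))
    (g : (String × List (List String)) → List (String × Int))
    (hg : ∀ p, (g p).map Prod.fst = pvTripleKeys p)
    (hnd : (l.flatMap pvTripleKeys).Nodup) :
    (l.foldl (fun ts p => (g p).foldl (fun d a => d.insert a.1 a.2) ts) PySem.Dict.empty).items
      = l.flatMap g := by
  rw [← List.foldl_flatMap]
  have := PySem.Dict.items_foldl_insert_fresh (l.flatMap g) Prod.fst Prod.snd PySem.Dict.empty
    (by intro a _; simp [PySem.Dict.contains_empty])
    (by rw [List.map_flatMap]; simpa [hg] using hnd)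
  simpa using this

-- ===== VERDICT (by name: the statement is the Claim_ definition above) =====
theorem select_condorcet_winner_spec : Claim_equal_select_condorcet_winner := by
  intro vote_result voters_coefs _ hpre
  obtain ⟨-, hnd, -⟩ := hpre
  unfold Spec_select_condorcet_winner select_condorcet_winner select_condorcet_winner_alt
  simp only
  set vr := PySem.Dict.ofList vote_result with hvr
  have hndk : vr.keys.Nodup := PySem.Dict.nodup_keys_ofList vote_result
  have hndsk : (vr.items.flatMap pvTripleKeys).Nodup := hnd
  -- A's dict: rewrite the fold over keys as a fold over items inserting each block
  have hkeys_map : vr.keys = vr.items.map Prod.fst := rfl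
  have hTA : (vr.keys.foldl (fun ts item =>
      let votes := vr.getD item []
      let ts := ts.insert item ((votes.filter (fun x => (PySem.List.pyGetD x 2 "") != "")).length : Int)
      let ts := ts.insert (item ++ ":v1") ((votes.filter (fun x => ((PySem.List.pyGetD x 0 "") == "v1") && ((PySem.List.pyGetD x 2 "") != ""))).length : Int)
      ts.insert (item ++ ":v2") ((votes.filter (fun x => ((PySem.List.pyGetD x 0 "") == "v2") && ((PySem.List.pyGetD x 2 "") != ""))).length : Int)
    ) PySem.Dict.empty).items = vr.items.flatMap pvBlk := by
    rw [hkeys_map, List.foldl_map]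
    rw [PySem.List.foldl_congr_mem _ _
        (fun ts p => (pvBlk p).foldl (fun d a => d.insert a.1 a.2) ts) _
        (by
          intro ts p hp
          have hget : vr.getD p.1 [] = p.2 := PySem.Dict.getD_of_mem_items vr hp hndk []
          simp [hget, pvBlk, pvC1, pvC2, pvC3])]
    exact pvInsertBlocks vr.items pvBlk (by intro p; simp [pvBlk, pvTripleKeys]) hndsk
  -- B's seed dict
  have hT0 : (vr.keys.foldl (fun ts item =>
      ((ts.insert item (0 : Int)).insert (item ++ ":v1") 0).insert (item ++ ":v2") 0) PySem.Dict.empty).items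
      = vr.items.flatMap (fun p => (pvTripleKeys p).map (fun k => (k, (0 : Int)))) := by
    rw [hkeys_map, List.foldl_map]
    rw [PySem.List.foldl_congr_mem _ _
        (fun ts p => ((pvTripleKeys p).map (fun k => (k, (0 : Int)))).foldl (fun d a => d.insert a.1 a.2) ts) _
        (by intro ts p _; simp [pvTripleKeys])]
    exact pvInsertBlocks vr.items _ (by intro p; simp [List.map_map, Function.comp_def]) hndsk
  set TA := vr.keys.foldl (fun ts item =>
      let votes := vr.getD item []
      let ts := ts.insert item ((votes.filter (fun x => (PySem.List.pyGetD x 2 "") != "")).length : Int)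
      let ts := ts.insert (item ++ ":v1") ((votes.filter (fun x => ((PySem.List.pyGetD x 0 "") == "v1") && ((PySem.List.pyGetD x 2 "") != ""))).length : Int)
      ts.insert (item ++ ":v2") ((votes.filter (fun x => ((PySem.List.pyGetD x 0 "") == "v2") && ((PySem.List.pyGetD x 2 "") != ""))).length : Int)
    ) PySem.Dict.empty with hTAdef
  set T0 := vr.keys.foldl (fun ts item =>
      ((ts.insert item (0 : Int)).insert (item ++ ":v1") 0).insert (item ++ ":v2") 0) PySem.Dict.empty with hT0def
  set TB := vr.items.foldl (fun ts p =>
      p.2.foldl (fun ts x =>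
        if (PySem.List.pyGetD x 2 "") != "" then
          let ts := ts.modify p.1 0 (· + 1)
          if (PySem.List.pyGetD x 0 "") == "v1" then ts.modify (p.1 ++ ":v1") 0 (· + 1)
          else if (PySem.List.pyGetD x 0 "") == "v2" then ts.modify (p.1 ++ ":v2") 0 (· + 1)
          else ts
        else ts) ts) T0 with hTBdef
  -- key lists
  have hTAkeys : TA.keys = vr.items.flatMap pvTripleKeys := by
    show TA.items.map Prod.fst = _
    rw [hTA, List.map_flatMap]
    have he : (fun a : String × List (List String) => [a.1, a.1 ++ ":v1", a.1 ++ ":v2"]) = pvTripleKeys := by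
      funext p; rfl
    simp only [pvBlk, List.map_cons, List.map_nil]
    rw [← he]
  have hT0keys : T0.keys = vr.items.flatMap pvTripleKeys := by
    show T0.items.map Prod.fst = _
    rw [hT0, List.map_flatMap]
    have he : (fun a : String × List (List String) => [a.1, a.1 ++ ":v1", a.1 ++ ":v2"]) = pvTripleKeys := by
      funext p; rfl
    simp only [List.map_map, Function.comp_def, pvTripleKeys, List.map_cons, List.map_nil]
    rw [← he]
  have hT0in : ∀ p ∈ vr.items, p.1 ∈ T0.keys ∧ p.1 ++ ":v1" ∈ T0.keys ∧ p.1 ++ ":v2" ∈ T0.keys := by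
    intro p hp
    rw [hT0keys]
    refine ⟨?_, ?_, ?_⟩ <;> exact List.mem_flatMap.mpr ⟨p, hp, by simp [pvTripleKeys]⟩
  have houter := pvOuter vr.items T0 hT0in
  have hTBkeys : TB.keys = vr.items.flatMap pvTripleKeys := by rw [hTBdef, houter.1, hT0keys]
  have hTAnd : TA.keys.Nodup := by rw [hTAkeys]; exact hndsk
  have hTBnd : TB.keys.Nodup := by rw [hTBkeys]; exact hndsk
  -- the two dicts are equal
  have hdicts : TB = TA := by
    apply PySem.Dict.ext
    rw [PySem.Dict.items_eq_map_keys TB hTBnd 0, PySem.Dict.items_eq_map_keys TA hTAnd 0,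
      hTBkeys, hTAkeys]
    apply List.map_congr_left
    intro k hk
    have hblk : ∃ v, (k, v) ∈ vr.items.flatMap pvBlk := by
      simp only [List.mem_flatMap] at hk ⊢
      obtain ⟨p, hp, hkp⟩ := hk
      simp only [pvTripleKeys, List.mem_cons, List.not_mem_nil, or_false] at hkp
      rcases hkp with h | h | h
      · exact ⟨pvC1 p.2, p, hp, by simp [pvBlk, h]⟩
      · exact ⟨pvC2 p.2, p, hp, by simp [pvBlk, h]⟩
      · exact ⟨pvC3 p.2, p, hp, by simp [pvBlk, h]⟩
    obtain ⟨v, hv⟩ := hblk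
    have hTAk : TA.getD k 0 = v := PySem.Dict.getD_of_mem_items TA (hTA ▸ hv) hTAnd 0
    have hT0k : T0.getD k 0 = 0 := by
      have hv0 : (k, (0 : Int)) ∈ T0.items := by
        rw [hT0]
        simp only [List.mem_flatMap] at hk ⊢
        obtain ⟨p, hp, hkp⟩ := hk
        exact ⟨p, hp, List.mem_map.mpr ⟨k, hkp, rfl⟩⟩
      have hT0nd : T0.keys.Nodup := by rw [hT0keys]; exact hndsk
      exact PySem.Dict.getD_of_mem_items T0 hv0 hT0nd 0
    have hTBk : TB.getD k 0 = v := by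
      rw [hTBdef, houter.2 k, hT0k, pvSum k v vr.items hndsk hv, zero_add]
    rw [hTBk, hTAk]
  rw [hdicts]
  -- B's running-best scan is A's max over the same items
  have hfold : TA.items.foldl (fun acc kv =>
      match acc with
      | none => some kv
      | some b => if kv.2 > b.2 then some kv else some b) (none : Option (String × Int)) =
      PySem.List.max? TA.items (fun p => p.2) := by
    unfold PySem.List.max?
    congr 1
    funext acc kv
    cases acc with
    | none => rfl
    | some b => simp [gt_iff_lt]
  rw [hfold]
  cases h : PySem.List.max? TA.items (fun p => p.2) with
  | none => rfl
  | some w =>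
    have hw : w ∈ TA.items := PySem.List.max?_mem h
    have : TA.getD w.1 0 = w.2 := PySem.Dict.getD_of_mem_items TA (by simpa using hw) hTAnd 0
    simp [this]
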